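-- pv_equiv track=rewrite | github.com/heeom/Algorithm | 프로그래머스/n^2 배열 자르기.py | solution
-- ===== SOURCE A (Python) =====
-- def solution(n, left, right):
--     answer = []
--     start_row = left // n
--     start_col = left % n
--     end_row = right // n
--     end_col = right % n
--
--     #시작행 ~ 마지막행-1까지
--     for i in range(start_row, end_row):
--         for j in range(n):
--             if i < j:
--                 answer.append(j+1)
--             else:
--                 answer.append(i+1)
--     #마지막행
--     for i in range(end_col+1):
--         if i < end_row:
--             answer.append(end_row+1)
--         else:
--             answer.append(i+1)
--
--     return answer[start_col:]
-- ===== SOURCE B (Python) =====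
-- def solution(n, left, right):
--     return [max(divmod(idx, n)) + 1 for idx in range(left, right + 1)]
-- ===== Notes on version B (the rewrite author's own statement) =====
-- stated objective: simpler
-- what changed: Replaces the nested row/column loops, the separate last-row loop and the trailing slice by a single flat pass over the output indices left..right, each element computed as max(divmod(idx, n)) + 1.
-- intended difference: On inputs with n >= 1, left > right and left % n <= right % n (outside the problem's guarantee 0 <= left <= right), A returns a nonempty leftover slice of its last-row loop (e.g. [3] at (3, 5, 2)) while B returns [], the intended value for an empty index range. — e.g. on solution(3, 5, 2): A returns [3], B returns []
-- outside the precondition, e.g. on solution(-2, 0, 1): A returns [], B returns [1, 0]; on solution(-2, 3, 2): A returns [1], B returns []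
import Mathlib
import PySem

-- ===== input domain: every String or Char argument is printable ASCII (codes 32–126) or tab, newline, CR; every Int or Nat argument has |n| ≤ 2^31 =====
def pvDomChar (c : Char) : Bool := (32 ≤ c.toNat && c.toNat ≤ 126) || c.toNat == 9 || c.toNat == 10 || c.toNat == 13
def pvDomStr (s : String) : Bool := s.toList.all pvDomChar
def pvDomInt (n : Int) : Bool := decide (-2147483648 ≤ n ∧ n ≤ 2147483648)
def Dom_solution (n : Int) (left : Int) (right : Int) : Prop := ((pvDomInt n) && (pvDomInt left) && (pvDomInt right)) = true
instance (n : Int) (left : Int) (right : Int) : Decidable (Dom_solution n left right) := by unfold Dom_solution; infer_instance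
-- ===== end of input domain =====

-- B: one flat pass over the output indices left..right computing max(idx//n, idx%n)+1,
-- replacing A's nested row loops + last-row loop + trailing slice (objective: simpler).


-- ===== PORT A =====
def solution (n : Int) (left : Int) (right : Int) : List Int :=
  let answer : List Int := []
  let start_row := PySem.Int.floordiv left n
  let start_col := PySem.Int.mod left n
  let end_row := PySem.Int.floordiv right n
  let end_col := PySem.Int.mod right n
  -- rows start_row .. end_row-1
  let answer := (PySem.List.pyRange start_row end_row 1).foldl (fun acc i =>
      (PySem.List.pyRange 0 n 1).foldl (fun acc j =>
        if i < j then acc ++ [j + 1] else acc ++ [i + 1]) acc) answer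
  -- last row
  let answer := (PySem.List.pyRange 0 (end_col + 1) 1).foldl (fun acc i =>
      if i < end_row then acc ++ [end_row + 1] else acc ++ [i + 1]) answer
  PySem.List.slice answer (some start_col) none

-- ===== PORT B =====
-- max(divmod(idx, n)) + 1  =  max (idx // n) (idx % n) + 1
def solution_alt (n : Int) (left : Int) (right : Int) : List Int :=
  (PySem.List.pyRange left (right + 1) 1).map
    (fun idx => max (PySem.Int.floordiv idx n) (PySem.Int.mod idx n) + 1)

-- ===== PRECONDITION & SPEC =====
-- Pre_ excludes n = 0, on which A raises ZeroDivisionError, and those n < 0 inputs (outside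
-- the problem's stated domain 1 <= n) on which Python's negative-divisor floor/mod arithmetic
-- gives A and B unrelated accidental values; the n < 0 inputs with right < left and n not
-- dividing right, where both programs return [], remain admitted.
def Pre_solution (n : Int) (left : Int) (right : Int) : Prop :=
  1 ≤ n ∨ (n ≤ -1 ∧ right < left ∧ ¬ (n ∣ right))
instance (n : Int) (left : Int) (right : Int) : Decidable (Pre_solution n left right) := by unfold Pre_solution; infer_instance
def pvWitness_solution : Int × Int × Int := (3, 2, 5)
-- On inputs with left > right and left % n ≤ right % n (outside the problem's guarantee
-- 0 ≤ left ≤ right), A returns a nonempty leftover slice of its last-row loop while B returns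
-- [], the intended value for an empty index range.
def D_solution (n : Int) (left : Int) (right : Int) : Prop :=
  1 ≤ n ∧ right < left ∧ PySem.Int.mod left n ≤ PySem.Int.mod right n
instance (n : Int) (left : Int) (right : Int) : Decidable (D_solution n left right) := by unfold D_solution; infer_instance
def Spec_solution (n : Int) (left : Int) (right : Int) (out : List Int) : Prop := ¬ D_solution n left right → out = solution_alt n left right
instance (n : Int) (left : Int) (right : Int) (out : List Int) : Decidable (Spec_solution n left right out) := by unfold Spec_solution; infer_instance
def pvDiffWitness_solution : Int × Int × Int := (3, 5, 2)
def pvDiffWitnessOut_solution : (List Int) × (List Int) := ([3], [])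

-- ===== CLAIM (what is proved, stated in full; the proofs are below) =====
def Claim_unchanged_solution : Prop := ∀ (n : Int) (left : Int) (right : Int), Dom_solution n left right → Pre_solution n left right → Spec_solution n left right (solution n left right)
def Claim_changed_solution : Prop := Dom_solution (pvDiffWitness_solution.1) (pvDiffWitness_solution.2.1) (pvDiffWitness_solution.2.2) ∧ Pre_solution (pvDiffWitness_solution.1) (pvDiffWitness_solution.2.1) (pvDiffWitness_solution.2.2) ∧ D_solution (pvDiffWitness_solution.1) (pvDiffWitness_solution.2.1) (pvDiffWitness_solution.2.2) ∧ solution (pvDiffWitness_solution.1) (pvDiffWitness_solution.2.1) (pvDiffWitness_solution.2.2) = pvDiffWitnessOut_solution.1 ∧ solution_alt (pvDiffWitness_solution.1) (pvDiffWitness_solution.2.1) (pvDiffWitness_solution.2.2) = pvDiffWitnessOut_solution.2 ∧ pvDiffWitnessOut_solution.1 ≠ pvDiffWitnessOut_solution.2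
def Claim_exact_solution : Prop := ∀ (n : Int) (left : Int) (right : Int), Dom_solution n left right → Pre_solution n left right → D_solution n left right → solution n left right ≠ solution_alt n left right

-- ===== LEMMAS AND PROOFS =====

-- the per-element formula of B
def pvF (n idx : Int) : Int := max (PySem.Int.floordiv idx n) (PySem.Int.mod idx n) + 1

lemma pvF_cell (n i k : Int) (hn : 0 < n) (hk0 : 0 ≤ k) (hkn : k < n) :
    pvF n (i * n + k) = max i k + 1 := by
  have hfd : PySem.Int.floordiv (i * n + k) n = i := by
    rw [PySem.Int.floordiv_eq_iff_of_pos hn]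
    constructor <;> nlinarith
  have hmd := PySem.Int.floordiv_mul_add_mod (i * n + k) n
  rw [hfd] at hmd
  have hmod : PySem.Int.mod (i * n + k) n = k := by linarith
  simp [pvF, hfd, hmod]

-- a prefix of row i, written with B's formula over flat indices
lemma pvRowUpto (n i b : Int) (hn : 0 < n) (hb : b ≤ n) :
    (PySem.List.pyRange 0 b 1).map (fun j => max i j + 1)
      = (PySem.List.pyRange (i * n) (i * n + b) 1).map (pvF n) := by
  rw [PySem.List.pyRange_one 0 b, PySem.List.pyRange_one (i * n) (i * n + b)]
  have h1 : b - 0 = b := by ring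
  have h2 : i * n + b - i * n = b := by ring
  rw [h1, h2]
  simp only [List.map_map]
  refine List.map_congr_left (fun k hk => ?_)
  rw [List.mem_range] at hk
  have hkb : (k : Int) < b := by omega
  simp only [Function.comp_apply]
  rw [pvF_cell n i k hn (Int.natCast_nonneg k) (by omega)]
  omega

-- concatenating full rows sr .. sr+m-1 is B's formula over the flat range
lemma pvRows (n : Int) (hn : 0 < n) (sr : Int) (m : Nat) :
    (PySem.List.pyRange sr (sr + m) 1).flatMap
        (fun i => (PySem.List.pyRange (i * n) (i * n + n) 1).map (pvF n))
      = (PySem.List.pyRange (sr * n) ((sr + m) * n) 1).map (pvF n) := by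
  induction m with
  | zero => simp [PySem.List.pyRange_one_eq_nil]
  | succ m ih =>
    have h1 : sr + ((m + 1 : Nat) : Int) = (sr + m) + 1 := by push_cast; ring
    rw [h1, PySem.List.pyRange_one_succ_right (by omega)]
    rw [List.flatMap_append, ih]
    have hsplit := PySem.List.pyRange_one_append (sr * n) ((sr + (m : Int)) * n)
        ((sr + (m : Int) + 1) * n)
        (by nlinarith [mul_nonneg (Int.natCast_nonneg m) hn.le])
        (by nlinarith [hn.le])
    rw [hsplit, List.map_append]
    have h2 : (sr + (m : Int) + 1) * n = (sr + (m : Int)) * n + n := by ring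
    simp [h2]

-- on left ≤ right the two ports agree
lemma pvEq_le (n left right : Int) (hn' : 0 < n) (hlr : left ≤ right) :
    solution n left right = solution_alt n left right := by
  unfold solution solution_alt
  simp only []
  set sr := PySem.Int.floordiv left n with hsr
  set sc := PySem.Int.mod left n with hsc
  set er := PySem.Int.floordiv right n with her
  set ec := PySem.Int.mod right n with hec
  have hsc0 : 0 ≤ sc := PySem.Int.mod_nonneg left hn'
  have hscn : sc < n := PySem.Int.mod_lt left hn'
  have hec0 : 0 ≤ ec := PySem.Int.mod_nonneg right hn'
  have hecn : ec < n := PySem.Int.mod_lt right hn'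
  have hsuml : sr * n + sc = left := PySem.Int.floordiv_mul_add_mod left n
  have hsumr : er * n + ec = right := PySem.Int.floordiv_mul_add_mod right n
  have hsrer : sr ≤ er := by
    by_contra h
    push Not at h
    have h1 : er + 1 ≤ sr := by omega
    nlinarith [mul_le_mul_of_nonneg_right h1 hn'.le]
  -- inner row loop: appends max i j + 1 for each j of the row
  have hinner : ∀ (acc : List Int) (i : Int),
      (PySem.List.pyRange 0 n 1).foldl
        (fun acc j => if i < j then acc ++ [j + 1] else acc ++ [i + 1]) acc
      = acc ++ (PySem.List.pyRange (i * n) (i * n + n) 1).map (pvF n) := by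
    intro acc i
    have hb := PySem.List.foldl_congr_mem (PySem.List.pyRange 0 n 1)
        (fun acc j => if i < j then acc ++ [j + 1] else acc ++ [i + 1])
        (fun acc j => acc ++ [max i j + 1]) acc ?_
    · rw [hb, PySem.List.foldl_append_singleton_eq_map, pvRowUpto n i n hn' le_rfl]
    · intro a j _
      dsimp only
      split_ifs with h
      · have hj : j + 1 = max i j + 1 := by omega
        rw [hj]
      · have hj : i + 1 = max i j + 1 := by omega
        rw [hj]
  -- the two loops together build B's formula over the flat indices sr*n .. right
  have houter : (PySem.List.pyRange sr er 1).foldl (fun acc i =>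
      (PySem.List.pyRange 0 n 1).foldl
        (fun acc j => if i < j then acc ++ [j + 1] else acc ++ [i + 1]) acc) ([] : List Int)
      = (PySem.List.pyRange (sr * n) (er * n) 1).map (pvF n) := by
    rw [PySem.List.foldl_congr_mem (PySem.List.pyRange sr er 1) _
        (fun acc i => acc ++ (PySem.List.pyRange (i * n) (i * n + n) 1).map (pvF n)) _
        (fun acc i _ => hinner acc i)]
    rw [PySem.List.foldl_append_eq_flatMap]
    have hm : er = sr + ((er - sr).toNat : Int) := by omega
    rw [List.nil_append, hm, pvRows n hn' sr (er - sr).toNat]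
  have hlast : (PySem.List.pyRange 0 (ec + 1) 1).foldl
      (fun acc i => if i < er then acc ++ [er + 1] else acc ++ [i + 1])
      ((PySem.List.pyRange (sr * n) (er * n) 1).map (pvF n))
      = (PySem.List.pyRange (sr * n) (right + 1) 1).map (pvF n) := by
    have hb := PySem.List.foldl_congr_mem (PySem.List.pyRange 0 (ec + 1) 1)
        (fun acc i => if i < er then acc ++ [er + 1] else acc ++ [i + 1])
        (fun acc i => acc ++ [max er i + 1])
        ((PySem.List.pyRange (sr * n) (er * n) 1).map (pvF n)) ?_
    · rw [hb, PySem.List.foldl_append_singleton_eq_map,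
        pvRowUpto n er (ec + 1) hn' (by omega), ← List.map_append,
        ← PySem.List.pyRange_one_append (sr * n) (er * n) (er * n + (ec + 1))
          (by nlinarith [mul_le_mul_of_nonneg_right hsrer hn'.le]) (by omega)]
      have hr : er * n + (ec + 1) = right + 1 := by omega
      rw [hr]
    · intro a i _
      dsimp only
      split_ifs with h
      · have hi : er + 1 = max er i + 1 := by omega
        rw [hi]
      · have hi : i + 1 = max er i + 1 := by omega
        rw [hi]
  rw [houter, hlast, PySem.List.slice_from _ hsc0]
  -- dropping the first sc elements leaves exactly the indices left .. right
  have hsplit : PySem.List.pyRange (sr * n) (right + 1) 1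
      = PySem.List.pyRange (sr * n) left 1 ++ PySem.List.pyRange left (right + 1) 1 :=
    PySem.List.pyRange_one_append _ _ _ (by omega) (by omega)
  have hlen : ((PySem.List.pyRange (sr * n) left 1).map (pvF n)).length = sc.toNat := by
    simp [PySem.List.length_pyRange_one]
    omega
  rw [hsplit, List.map_append, List.drop_left' hlen]
  rfl

-- on right < left A's first loop is empty and what remains is the sliced last-row loop
lemma pvA_gt (n left right : Int) (hn' : 0 < n) (hgt : right < left) :
    solution n left right
      = ((PySem.List.pyRange 0 (PySem.Int.mod right n + 1) 1).map
          (fun i => max (PySem.Int.floordiv right n) i + 1)).drop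
        (PySem.Int.mod left n).toNat := by
  unfold solution
  simp only []
  set sr := PySem.Int.floordiv left n with hsr
  set sc := PySem.Int.mod left n with hsc
  set er := PySem.Int.floordiv right n with her
  set ec := PySem.Int.mod right n with hec
  have hsc0 : 0 ≤ sc := PySem.Int.mod_nonneg left hn'
  have hscn : sc < n := PySem.Int.mod_lt left hn'
  have hec0 : 0 ≤ ec := PySem.Int.mod_nonneg right hn'
  have hecn : ec < n := PySem.Int.mod_lt right hn'
  have hsuml : sr * n + sc = left := PySem.Int.floordiv_mul_add_mod left n
  have hsumr : er * n + ec = right := PySem.Int.floordiv_mul_add_mod right n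
  have heqsr : er ≤ sr := by
    by_contra h
    push Not at h
    have h1 : sr + 1 ≤ er := by omega
    nlinarith [mul_le_mul_of_nonneg_right h1 hn'.le]
  rw [PySem.List.pyRange_one_eq_nil heqsr]
  simp only [List.foldl_nil]
  have hb := PySem.List.foldl_congr_mem (PySem.List.pyRange 0 (ec + 1) 1)
      (fun acc i => if i < er then acc ++ [er + 1] else acc ++ [i + 1])
      (fun acc i => acc ++ [max er i + 1]) ([] : List Int) ?_
  · rw [hb, PySem.List.foldl_append_singleton_eq_map, List.nil_append,
      PySem.List.slice_from _ hsc0]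
  · intro a i _
    dsimp only
    split_ifs with h
    · have hi : er + 1 = max er i + 1 := by omega
      rw [hi]
    · have hi : i + 1 = max er i + 1 := by omega
      rw [hi]

-- on the admitted n < 0 inputs (right < left, n does not divide right) both sides are []
lemma pvNegTrivial (n left right : Int) (hneg : n ≤ -1) (hgt : right < left)
    (hndvd : ¬ (n ∣ right)) :
    solution n left right = solution_alt n left right := by
  have hbounds := PySem.Int.mod_neg_bounds right (show n < 0 by omega)
  have hne : PySem.Int.mod right n ≠ 0 := by
    intro h
    exact hndvd ((PySem.Int.mod_eq_zero_iff_dvd right n).mp h)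
  unfold solution solution_alt
  simp only []
  rw [show PySem.List.pyRange 0 n 1 = [] from PySem.List.pyRange_one_eq_nil (by omega)]
  simp only [List.foldl_nil]
  rw [PySem.List.foldl_ignore]
  rw [show PySem.List.pyRange 0 (PySem.Int.mod right n + 1) 1 = [] from
      PySem.List.pyRange_one_eq_nil (by omega)]
  rw [show PySem.List.pyRange left (right + 1) 1 = [] from
      PySem.List.pyRange_one_eq_nil (by omega)]
  simp [PySem.List.slice_some_none]

-- ===== VERDICT =====
theorem solution_spec : Claim_unchanged_solution := by
  intro n left right _ hpre hD
  unfold Pre_solution at hpre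
  rcases hpre with hn | ⟨hneg, hgt, hndvd⟩
  case inr => exact pvNegTrivial n left right hneg hgt hndvd
  have hn' : 0 < n := by omega
  by_cases hlr : left ≤ right
  · exact pvEq_le n left right hn' hlr
  · push Not at hlr
    have hec : PySem.Int.mod right n < PySem.Int.mod left n := by
      unfold D_solution at hD
      push Not at hD
      exact hD (by omega) hlr
    rw [pvA_gt n left right hn' hlr]
    unfold solution_alt
    rw [show PySem.List.pyRange left (right + 1) 1 = [] from
        PySem.List.pyRange_one_eq_nil (by omega), List.map_nil]
    refine List.drop_eq_nil_of_le ?_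
    have hec0 : 0 ≤ PySem.Int.mod right n := PySem.Int.mod_nonneg right hn'
    simp [PySem.List.length_pyRange_one]
    omega

theorem solution_changed : Claim_changed_solution := by
  unfold Claim_changed_solution
  decide

theorem solution_tight : Claim_exact_solution := by
  intro n left right _ _ hD
  obtain ⟨hn, hgt, hle⟩ := hD
  have hn' : 0 < n := by omega
  have hec0 : 0 ≤ PySem.Int.mod right n := PySem.Int.mod_nonneg right hn'
  have hsc0 : 0 ≤ PySem.Int.mod left n := PySem.Int.mod_nonneg left hn'
  rw [pvA_gt n left right hn' hgt]
  unfold solution_alt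
  rw [show PySem.List.pyRange left (right + 1) 1 = [] from
      PySem.List.pyRange_one_eq_nil (by omega), List.map_nil]
  intro h
  have hlen := congrArg List.length h
  simp [PySem.List.length_pyRange_one] at hlen
  omega
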